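-- pv_equiv track=rewrite | github.com/K-L-SRUJAN/AI | LAB7/firstorderlogic_to_CNF.py | standardize_variables
-- ===== SOURCE A (Python) =====
-- def standardize_variables(expr):
--     var_map = {}
--     new_expr = ""
--     counter = 0
--
--     for ch in expr:
--         if ch.islower():
--             if ch not in var_map:
--                 var_map[ch] = f"v{counter}"
--                 counter += 1
--             new_expr += var_map[ch]
--         else:
--             new_expr += ch
--
--     return new_expr
-- ===== SOURCE B (Python) =====
-- def standardize_variables(expr):
--     # Stateless: each lowercase char's number is determined directly from expr --
--     # the count of distinct lowercase chars strictly before its first occurrence.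
--     def rank(ch):
--         return len({d for d in expr[:expr.index(ch)] if d.islower()})
--
--     return "".join("v%d" % rank(ch) if ch.islower() else ch for ch in expr)
-- ===== Notes on version B (the rewrite author's own statement) =====
-- stated objective: alternative
-- what changed: Replaces A's stateful single pass (dict + running counter + incremental concatenation) with a stateless per-character formula: each lowercase char's number is recomputed independently as the count of distinct lowercase chars strictly before its first occurrence in expr (a nested scan), trading speed for statelessness.
import Mathlib
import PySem

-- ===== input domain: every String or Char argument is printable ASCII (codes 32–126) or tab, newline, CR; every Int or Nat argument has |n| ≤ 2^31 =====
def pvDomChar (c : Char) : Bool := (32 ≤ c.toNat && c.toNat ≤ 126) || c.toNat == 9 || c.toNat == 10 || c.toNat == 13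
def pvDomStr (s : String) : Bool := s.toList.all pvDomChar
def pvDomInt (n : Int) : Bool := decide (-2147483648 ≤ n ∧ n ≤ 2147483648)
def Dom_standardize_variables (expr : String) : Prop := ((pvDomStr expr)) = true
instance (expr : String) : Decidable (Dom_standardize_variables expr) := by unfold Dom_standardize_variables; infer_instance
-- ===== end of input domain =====

-- B replaces A's stateful pass (dict + counter) with a stateless per-character formula
-- recomputed from expr itself (alternative decomposition; B is not faster).

-- ===== PORT A =====
-- A's loop over the characters; new_expr is carried as a List Char (Python string concatenation),
-- the dict values "v{counter}" as List Char ('v' :: str(counter)).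
def svLoopA (l : List Char) (var_map : PySem.Dict Char (List Char)) (new_expr : List Char)
    (counter : Int) : List Char :=
  match l with
  | [] => new_expr
  | ch :: t =>
    if PySem.Chars.islower ch then
      if var_map.contains ch then
        -- 'ch in var_map' already: new_expr += var_map[ch]  (key present, so getD's default is unreachable)
        svLoopA t var_map (new_expr ++ var_map.getD ch []) counter
      else
        svLoopA t (var_map.insert ch ('v' :: PySem.Int.toChars counter))
          (new_expr ++ ('v' :: PySem.Int.toChars counter)) (counter + 1)
    else
      svLoopA t var_map (new_expr ++ [ch]) counter

def standardize_variables (expr : String) : String :=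
  String.ofList (svLoopA expr.toList PySem.Dict.empty [] 0)

-- ===== PORT B =====
-- rank(ch) = len({d for d in expr[:expr.index(ch)] if d.islower()}):
-- expr.index(ch) = first index (ch is always present when rank is called),
-- the set comprehension = PySem.Set.ofList of the filtered prefix.
def svRank (l : List Char) (ch : Char) : Int :=
  ((PySem.Set.ofList ((l.take (l.idxOf ch)).filter PySem.Chars.islower)).length : Int)

def standardize_variables_alt (expr : String) : String :=
  String.ofList (expr.toList.flatMap (fun ch =>
    if PySem.Chars.islower ch then 'v' :: PySem.Int.toChars (svRank expr.toList ch)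
    else [ch]))

-- ===== PRECONDITION & SPEC =====
def Spec_standardize_variables (expr : String) (out : String) : Prop := out = standardize_variables_alt expr
instance (expr : String) (out : String) : Decidable (Spec_standardize_variables expr out) := by unfold Spec_standardize_variables; infer_instance

-- ===== CLAIM (what is proved, stated in full; the proofs are below) =====
def Claim_equal_standardize_variables : Prop := ∀ (expr : String), Dom_standardize_variables expr → Spec_standardize_variables expr (standardize_variables expr)

-- ===== LEMMAS AND PROOFS =====

-- the deduplicated lowercase characters of a prefix
def dsOf (s : List Char) : List Char :=
  PySem.List.dedup (s.filter PySem.Chars.islower)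

-- the table A's dict converges to: key = i-th distinct lowercase char ↦ "v{i}"
def svTable (ks : List Char) : PySem.Dict Char (List Char) :=
  (PySem.List.enumerate ks).foldl (fun d p => d.insert p.2 ('v' :: PySem.Int.toChars p.1))
    PySem.Dict.empty

theorem dsOf_append (s l : List Char) :
    dsOf (s ++ l) = (l.filter PySem.Chars.islower).foldl PySem.Set.add (dsOf s) := by
  simp [dsOf, PySem.List.dedup_eq_ofList, PySem.Set.ofList_eq_foldl, List.filter_append,
    List.foldl_append]

theorem dsOf_nodup (s : List Char) : (dsOf s).Nodup :=
  PySem.List.nodup_dedup (s.filter PySem.Chars.islower)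

theorem dsOf_append_not_lower (s : List Char) (ch : Char)
    (h : PySem.Chars.islower ch = false) : dsOf (s ++ [ch]) = dsOf s := by
  simp [dsOf_append, h]

theorem dsOf_append_lower_mem (s : List Char) (ch : Char)
    (hl : PySem.Chars.islower ch = true) (hm : ch ∈ dsOf s) : dsOf (s ++ [ch]) = dsOf s := by
  simp [dsOf_append, hl, PySem.Set.add, PySem.Set.contains, hm]

theorem dsOf_append_lower_new (s : List Char) (ch : Char)
    (hl : PySem.Chars.islower ch = true) (hm : ch ∉ dsOf s) :
    dsOf (s ++ [ch]) = dsOf s ++ [ch] := by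
  simp [dsOf_append, hl, PySem.Set.add, PySem.Set.contains, hm]

theorem mem_dsOf_lower {s : List Char} {c : Char} (h : c ∈ dsOf s) :
    PySem.Chars.islower c = true := by
  rw [dsOf, PySem.List.mem_dedup, List.mem_filter] at h
  exact h.2

theorem mem_dsOf_iff {s : List Char} {c : Char} (hl : PySem.Chars.islower c = true) :
    c ∈ dsOf s ↔ c ∈ s := by
  rw [dsOf, PySem.List.mem_dedup, List.mem_filter]
  exact ⟨fun h => h.1, fun h => ⟨h, hl⟩⟩

-- a Set.add fold only appends: the start is a prefix of the result
theorem foldl_add_prefix (l a : List Char) : a <+: l.foldl PySem.Set.add a := by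
  induction l generalizing a with
  | nil => simp
  | cons x t ih =>
      refine List.IsPrefix.trans ?_ (ih (PySem.Set.add a x))
      simp only [PySem.Set.add]
      split
      · exact List.prefix_refl a
      · exact List.prefix_append a [x]

theorem dsOf_prefix (s l : List Char) : dsOf s <+: dsOf (s ++ l) := by
  rw [dsOf_append]; exact foldl_add_prefix _ _

-- lookup in the prebuilt table = position in ks
theorem svTable_aux_get? (ks : List Char) (i : Int) (d : PySem.Dict Char (List Char))
    (hnd : ks.Nodup) (c : Char) :
    ((PySem.List.enumerate ks i).foldl
        (fun d p => d.insert p.2 ('v' :: PySem.Int.toChars p.1)) d).get? c =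
      if c ∈ ks then some ('v' :: PySem.Int.toChars (i + ks.idxOf c)) else d.get? c := by
  induction ks generalizing i d with
  | nil => simp [PySem.List.enumerate_nil]
  | cons x t ih =>
      rw [PySem.List.enumerate_cons]
      simp only [List.foldl_cons]
      rw [ih (i + 1) _ (List.nodup_cons.mp hnd).2]
      rcases eq_or_ne c x with hx | hx
      · subst hx
        have hct : c ∉ t := (List.nodup_cons.mp hnd).1
        simp [hct, PySem.Dict.get?_insert_self, List.idxOf_cons_self]
      · by_cases hmt : c ∈ t
        · have harith : i + 1 + (List.idxOf c t : Int) = i + (List.idxOf c (x :: t) : Int) := by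
            rw [List.idxOf_cons_ne _ (Ne.symm hx)]; push_cast; ring
          rw [if_pos hmt, if_pos (List.mem_cons_of_mem x hmt), harith]
        · rw [if_neg hmt, if_neg (by simp [hx, hmt]), PySem.Dict.get?_insert]
          simp [hx]

theorem svTable_get? (ks : List Char) (hnd : ks.Nodup) (c : Char) :
    (svTable ks).get? c =
      if c ∈ ks then some ('v' :: PySem.Int.toChars (ks.idxOf c)) else none := by
  rw [svTable, svTable_aux_get? ks 0 _ hnd c]
  simp [PySem.Dict.get?_empty]

-- the value A looks up / inserts for ch equals the full table's value, by index stability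
theorem table_value_stable (s t : List Char) (ch : Char) (hmem : ch ∈ dsOf (s ++ [ch])) :
    (svTable (dsOf (s ++ [ch]))).getD ch [] =
      (svTable (dsOf (s ++ [ch] ++ t))).getD ch [ch] := by
  obtain ⟨r, hr⟩ := dsOf_prefix (s ++ [ch]) t
  have hmem' : ch ∈ dsOf (s ++ [ch] ++ t) := by
    rw [← hr]; exact List.mem_append_left _ hmem
  have hidx : (dsOf (s ++ [ch] ++ t)).idxOf ch = (dsOf (s ++ [ch])).idxOf ch := by
    rw [← hr]; exact List.idxOf_append_of_mem hmem
  rw [PySem.Dict.getD_eq_get?_getD, PySem.Dict.getD_eq_get?_getD,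
    svTable_get? _ (dsOf_nodup _) ch, svTable_get? _ (dsOf_nodup _) ch,
    if_pos hmem, if_pos hmem', hidx]
  rfl

-- A's dict after processing prefix `s` IS the table over dsOf s
theorem main_loop (l : List Char) : ∀ (s ne : List Char),
    svLoopA l (svTable (dsOf s)) ne ((dsOf s).length : Int) =
      ne ++ l.flatMap (fun c => (svTable (dsOf (s ++ l))).getD c [c]) := by
  induction l with
  | nil => intro s ne; simp [svLoopA]
  | cons ch t ih =>
      intro s ne
      have hfull : s ++ ch :: t = s ++ [ch] ++ t := by simp
      by_cases hl : PySem.Chars.islower ch = true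
      · by_cases hm : ch ∈ dsOf s
        · -- seen before: dict and counter unchanged
          have hds : dsOf (s ++ [ch]) = dsOf s := dsOf_append_lower_mem s ch hl hm
          have hcont : (svTable (dsOf s)).contains ch = true := by
            rw [PySem.Dict.contains_eq_isSome_get?, svTable_get? _ (dsOf_nodup s) ch]
            simp [hm]
          rw [svLoopA, if_pos hl, if_pos hcont]
          simp only [hfull]
          rw [← hds, ih (s ++ [ch]),
            table_value_stable s t ch (by rw [hds]; exact hm),
            List.flatMap_cons, List.append_assoc]
        · -- new variable: insert = extending the table by one key
          have hds : dsOf (s ++ [ch]) = dsOf s ++ [ch] := dsOf_append_lower_new s ch hl hm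
          have hcont : (svTable (dsOf s)).contains ch = false := by
            rw [PySem.Dict.contains_eq_isSome_get?, svTable_get? _ (dsOf_nodup s) ch]
            simp [hm]
          have hins : (svTable (dsOf s)).insert ch
                ('v' :: PySem.Int.toChars ((dsOf s).length : Int))
              = svTable (dsOf (s ++ [ch])) := by
            rw [hds, svTable, svTable, PySem.List.enumerate_append, List.foldl_append]
            simp [PySem.List.enumerate_cons, PySem.List.enumerate_nil]
          have hlen : ((dsOf s).length : Int) + 1 = ((dsOf (s ++ [ch])).length : Int) := by
            rw [hds, List.length_append, List.length_cons, List.length_nil]; push_cast; ring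
          have hval : 'v' :: PySem.Int.toChars ((dsOf s).length : Int)
              = (svTable (dsOf (s ++ [ch]))).getD ch [] := by
            have hmem : ch ∈ dsOf (s ++ [ch]) := by rw [hds]; simp
            have hidx : (dsOf (s ++ [ch])).idxOf ch = (dsOf s).length := by
              rw [hds, List.idxOf_append_of_notMem hm, List.idxOf_cons_self]
              simp
            rw [PySem.Dict.getD_eq_get?_getD, svTable_get? _ (dsOf_nodup _) ch,
              if_pos hmem, hidx]
            rfl
          rw [svLoopA, if_pos hl, if_neg (by simp [hcont]), hins, hlen]
          simp only [hfull]
          rw [ih (s ++ [ch]),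
            hval, table_value_stable s t ch (by rw [hds]; simp),
            List.flatMap_cons, List.append_assoc]
      · -- not lowercase: copied verbatim, key absent from every table
        have hl' : PySem.Chars.islower ch = false := by simpa using hl
        have hds : dsOf (s ++ [ch]) = dsOf s := dsOf_append_not_lower s ch hl'
        have hnm : ch ∉ dsOf (s ++ [ch] ++ t) := fun h => by
          have := mem_dsOf_lower h; rw [hl'] at this; exact Bool.false_ne_true this
        have hch : [ch] = (svTable (dsOf (s ++ [ch] ++ t))).getD ch [ch] := by
          rw [PySem.Dict.getD_eq_get?_getD, svTable_get? _ (dsOf_nodup _) ch, if_neg hnm]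
          rfl
        rw [svLoopA, if_neg (by simp [hl'])]
        simp only [hfull]
        rw [← hds, ih (s ++ [ch])]
        rw [List.flatMap_cons, ← hch, List.append_assoc]

-- the first-occurrence index in the dedup'd lowercase list = B's rank formula
theorem idxOf_dsOf_eq_rank (l : List Char) (c : Char)
    (hl : PySem.Chars.islower c = true) (hm : c ∈ l) :
    ((dsOf l).idxOf c : Int) = svRank l c := by
  -- split l at the FIRST occurrence of c
  have hk : l.idxOf c < l.length := List.idxOf_lt_length_of_mem hm
  set pre := l.take (l.idxOf c) with hpre_def
  have hsplit : l = pre ++ c :: l.drop (l.idxOf c + 1) := by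
    conv_lhs => rw [← List.take_append_drop (l.idxOf c) l]
    rw [List.drop_eq_getElem_cons hk, List.getElem_idxOf hk]
  have hpre : c ∉ pre := by
    rw [hpre_def, List.mem_take_iff_idxOf_lt hm]
    omega
  have hcpre : c ∉ dsOf pre := fun h =>
    hpre ((mem_dsOf_iff hl).mp h)
  have hstep : dsOf (pre ++ [c]) = dsOf pre ++ [c] :=
    dsOf_append_lower_new pre c hl hcpre
  have hidx2 : (dsOf l).idxOf c = (dsOf pre).length := by
    have hdl : dsOf l = dsOf ((pre ++ [c]) ++ l.drop (l.idxOf c + 1)) := by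
      conv_lhs => rw [hsplit]
      congr 1
      simp
    obtain ⟨r, hr⟩ := dsOf_prefix (pre ++ [c]) (l.drop (l.idxOf c + 1))
    rw [hdl, ← hr, List.idxOf_append_of_mem (by rw [hstep]; simp),
      hstep, List.idxOf_append_of_notMem hcpre, List.idxOf_cons_self]
    simp
  rw [hidx2, svRank, ← hpre_def, dsOf, PySem.List.dedup_eq_ofList]

-- ===== VERDICT (by name: the statement is the Claim_ definition above) =====
theorem standardize_variables_spec : Claim_equal_standardize_variables := by
  intro expr _
  unfold Spec_standardize_variables standardize_variables standardize_variables_alt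
  have h := main_loop expr.toList [] []
  have h0 : dsOf ([] : List Char) = [] := rfl
  rw [h0] at h
  simp only [List.nil_append, List.length_nil, Nat.cast_zero] at h
  have he : svTable ([] : List Char) = PySem.Dict.empty := by
    simp [svTable, PySem.List.enumerate_nil]
  rw [he] at h
  rw [h]
  congr 1
  refine List.flatMap_congr ?_
  intro c hc
  by_cases hl : PySem.Chars.islower c = true
  · have hm : c ∈ dsOf expr.toList := (mem_dsOf_iff hl).mpr hc
    rw [if_pos hl, PySem.Dict.getD_eq_get?_getD, svTable_get? _ (dsOf_nodup _) c,
      if_pos hm, idxOf_dsOf_eq_rank expr.toList c hl hc]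
    rfl
  · have hl' : PySem.Chars.islower c = false := by simpa using hl
    have hnm : c ∉ dsOf expr.toList := fun h => by
      have := mem_dsOf_lower h; rw [hl'] at this; exact Bool.false_ne_true this
    rw [if_neg (by simp [hl']), PySem.Dict.getD_eq_get?_getD,
      svTable_get? _ (dsOf_nodup _) c, if_neg hnm]
    rfl
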